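-- pv_equiv track=rewrite | github.com/ksadarsh/JWM | menumakers/pmenu/pmenu.py | get_cmd
-- ===== SOURCE A (Python) =====
-- def get_cmd(app):
--   if "Exec" in app:
--     cmd = ""
--     if "Path" in app and app["Path"]:
--       cmd += "cd " + app["Path"] + ";"
--     exe = ""
--     percent = False
--     for c in app["Exec"]:
--       if not percent:
--         if c == "%":
--           percent = True
--         else:
--           exe += c
--       else:
--         if c == "%":
--           exe += c
--           percent = False
--         else:
--           pass
--     cmd += exe
--     if "Terminal" in app and app["Terminal"] == "true":
--       cmd = "x-terminal-emulator -e '" + cmd + "'"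
--     return cmd
--   return None
-- ===== SOURCE B (Python) =====
-- def get_cmd(app):
--   if "Exec" not in app:
--     return None
--   first, *rest = app["Exec"].split("%")
--   exe = first
--   while len(rest) >= 2:
--     exe += "%" + rest[1]
--     rest = rest[2:]
--   cmd = ""
--   if app.get("Path"):
--     cmd = "cd " + app["Path"] + ";"
--   cmd += exe
--   if app.get("Terminal") == "true":
--     cmd = "x-terminal-emulator -e '" + cmd + "'"
--   return cmd
-- ===== Notes on version B (the rewrite author's own statement) =====
-- stated objective: simpler
-- what changed: Replaced the character-by-character percent-toggle state machine with a split('%')-based reassembly that keeps the first part and every second remaining part, joined by single '%' characters; the Path/Terminal wrapper is kept.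
import Mathlib
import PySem

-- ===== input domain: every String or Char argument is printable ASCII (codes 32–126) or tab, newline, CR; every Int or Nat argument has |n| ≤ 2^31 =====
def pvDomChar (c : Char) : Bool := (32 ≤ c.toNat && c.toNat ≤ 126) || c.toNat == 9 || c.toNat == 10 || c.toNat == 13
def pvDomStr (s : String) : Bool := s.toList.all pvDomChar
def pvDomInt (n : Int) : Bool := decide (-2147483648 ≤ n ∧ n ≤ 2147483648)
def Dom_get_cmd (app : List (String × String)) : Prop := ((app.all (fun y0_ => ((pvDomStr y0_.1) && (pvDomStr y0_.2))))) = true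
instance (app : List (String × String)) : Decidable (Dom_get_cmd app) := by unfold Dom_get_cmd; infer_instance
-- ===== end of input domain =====

-- B replaces A's char-by-char percent-toggle state machine with a split('%')-based
-- reassembly (objective: simpler); the Path/Terminal wrapper is unchanged.

-- ===== PORT A =====
-- the for-loop over app["Exec"] with its (exe, percent) state
def pvAExe : List Char → Bool → List Char → List Char
  | [], _, exe => exe
  | c :: rest, percent, exe =>
    if percent = false then
      if c = '%' then pvAExe rest true exe
      else pvAExe rest false (exe ++ [c])
    else
      if c = '%' then pvAExe rest false (exe ++ [c])
      else pvAExe rest true exe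

def get_cmd (app : List (String × String)) : Option String :=
  let d := PySem.Dict.mk app
  if d.contains "Exec" then
    let cmd1 : List Char :=
      if d.contains "Path" ∧ (d.getD "Path" "").toList ≠ [] then
        "cd ".toList ++ (d.getD "Path" "").toList ++ ";".toList
      else []
    let exe := pvAExe (d.getD "Exec" "").toList false []
    let cmd2 := cmd1 ++ exe
    let cmd3 :=
      if d.contains "Terminal" ∧ d.getD "Terminal" "" = "true" then
        "x-terminal-emulator -e '".toList ++ cmd2 ++ "'".toList
      else cmd2
    some (String.ofList cmd3)
  else none

-- ===== PORT B =====
-- the while-loop: consume two parts at a time, keep "%" + second one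
def pvBAsm : List (List Char) → List Char
  | _ :: kept :: rest => ('%' :: kept) ++ pvBAsm rest
  | _ => []

def get_cmd_alt (app : List (String × String)) : Option String :=
  let d := PySem.Dict.mk app
  match d.get? "Exec" with
  | none => none
  | some exec =>
    let exe : List Char :=
      match PySem.Chars.splitOn exec.toList ['%'] with
      | first :: rest => first ++ pvBAsm rest
      | [] => []   -- unreachable: split never returns an empty list
    let cmd1 : List Char :=
      match d.get? "Path" with
      | some p => if p.toList ≠ [] then "cd ".toList ++ p.toList ++ ";".toList else []
      | none => []
    let cmd2 := cmd1 ++ exe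
    let cmd3 :=
      if d.get? "Terminal" = some "true" then
        "x-terminal-emulator -e '".toList ++ cmd2 ++ "'".toList
      else cmd2
    some (String.ofList cmd3)

-- ===== PRECONDITION & SPEC =====
def Spec_get_cmd (app : List (String × String)) (out : Option String) : Prop := out = get_cmd_alt app
instance (app : List (String × String)) (out : Option String) : Decidable (Spec_get_cmd app out) := by unfold Spec_get_cmd; infer_instance

-- ===== CLAIM (what is proved, stated in full; the proofs are below) =====
def Claim_equal_get_cmd : Prop := ∀ (app : List (String × String)), Dom_get_cmd app → Spec_get_cmd app (get_cmd app)

-- ===== LEMMAS AND PROOFS =====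

-- structural characterisation of split on the single-character separator '%'
def pvSplit : List Char → List (List Char)
  | [] => [[]]
  | c :: rest => if c = '%' then [] :: pvSplit rest else (pvSplit rest).modifyHead (c :: ·)

theorem pvSplit_ne_nil (cs : List Char) : pvSplit cs ≠ [] := by
  cases cs with
  | nil => simp [pvSplit]
  | cons c rest =>
    simp only [pvSplit]
    split_ifs
    · simp
    · intro h
      have := congrArg List.length h
      simp at this
      exact pvSplit_ne_nil rest this

theorem pvModifyHead_fun_id (l : List (List Char)) : l.modifyHead (fun x => x) = l := by
  cases l <;> simp

theorem pvSplit_go (fuel : Nat) (l cur : List Char) (acc : List (List Char))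
    (h : l.length < fuel) :
    PySem.Chars.splitOn.go ['%'] fuel l cur acc
      = acc.reverse ++ (pvSplit l).modifyHead (cur.reverse ++ ·) := by
  induction fuel generalizing l cur acc with
  | zero => omega
  | succ fuel ih =>
    cases l with
    | nil =>
      simp [PySem.Chars.splitOn.go, pvSplit]
    | cons c rest =>
      by_cases hc : c = '%'
      · subst hc
        simp only [PySem.Chars.splitOn.go, List.isPrefixOf, BEq.rfl, Bool.true_and,
          if_true, List.length_singleton, List.drop_succ_cons,
          List.drop_zero]
        rw [ih rest [] (cur.reverse :: acc) (by simpa using Nat.lt_of_succ_lt_succ h)]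
        simp [pvSplit, pvModifyHead_fun_id]
      · have hpre : (['%'].isPrefixOf (c :: rest)) = false := by
          simp only [List.isPrefixOf, Bool.and_eq_false_iff, beq_eq_false_iff_ne, ne_eq]
          left
          exact fun hcq => hc hcq.symm
        simp only [PySem.Chars.splitOn.go, hpre, if_neg, Bool.false_eq_true, not_false_iff]
        rw [ih rest (c :: cur) acc (by simpa using Nat.lt_of_succ_lt_succ h)]
        obtain ⟨hhead, t, ht⟩ : ∃ hhead t, pvSplit rest = hhead :: t := by
          cases hr : pvSplit rest with
          | nil => exact absurd hr (pvSplit_ne_nil rest)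
          | cons a b => exact ⟨a, b, rfl⟩
        simp [pvSplit, hc, ht]

theorem splitOn_eq_pvSplit (cs : List Char) :
    PySem.Chars.splitOn cs ['%'] = pvSplit cs := by
  have := pvSplit_go (cs.length + 1) cs [] [] (by omega)
  simpa [PySem.Chars.splitOn, pvModifyHead_fun_id] using this

-- the machine's accumulator distributes
theorem pvAExe_acc (cs : List Char) (p : Bool) (exe : List Char) :
    pvAExe cs p exe = exe ++ pvAExe cs p [] := by
  induction cs generalizing p exe with
  | nil => simp [pvAExe]
  | cons c rest ih =>
    cases p with
    | false =>
      by_cases hc : c = '%'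
      · simp only [pvAExe, hc, reduceIte]
        exact ih true exe
      · simp only [pvAExe, if_neg hc, reduceIte, List.nil_append]
        rw [ih false (exe ++ [c]), ih false [c], List.append_assoc]
    | true =>
      by_cases hc : c = '%'
      · simp only [pvAExe, hc, Bool.true_eq_false, if_false, List.nil_append]
        rw [ih false (exe ++ ['%']), ih false ['%'], List.append_assoc]
        simp
      · simp only [pvAExe, if_neg hc, Bool.true_eq_false, if_false]
        exact ih true exe

-- the state machine equals the split-based reassembly, in both states
theorem pvAExe_eq_split (cs : List Char) :
    pvAExe cs false [] = (pvSplit cs).headD [] ++ pvBAsm (pvSplit cs).tail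
    ∧ pvAExe cs true [] = pvBAsm (pvSplit cs) := by
  induction cs with
  | nil => simp [pvAExe, pvSplit, pvBAsm]
  | cons c rest ih =>
    obtain ⟨ih0, ih1⟩ := ih
    obtain ⟨hhead, t, ht⟩ : ∃ hhead t, pvSplit rest = hhead :: t := by
      cases hr : pvSplit rest with
      | nil => exact absurd hr (pvSplit_ne_nil rest)
      | cons a b => exact ⟨a, b, rfl⟩
    by_cases hc : c = '%'
    · subst hc
      constructor
      · simp [pvAExe, pvSplit, ih1]
      · simp only [pvAExe, if_neg (by decide : ¬ (true = false))]
        rw [pvAExe_acc, ih0, ht]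
        simp [pvSplit, ht, pvBAsm]
    · constructor
      · simp only [pvAExe, if_neg hc]
        rw [pvAExe_acc, ih0, ht]
        simp [pvSplit, hc, ht]
      · simp only [pvAExe, if_neg (by decide : ¬ (true = false)), if_neg hc]
        rw [ih1, ht]
        simp only [pvSplit, hc, ht]
        cases t with
        | nil => simp [pvBAsm]
        | cons a b => simp [pvBAsm]

theorem exe_eq (s : String) :
    pvAExe s.toList false []
      = (match PySem.Chars.splitOn s.toList ['%'] with
         | first :: rest => first ++ pvBAsm rest
         | [] => []) := by
  rw [splitOn_eq_pvSplit]
  obtain ⟨hhead, t, ht⟩ : ∃ hhead t, pvSplit s.toList = hhead :: t := by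
    cases hr : pvSplit s.toList with
    | nil => exact absurd hr (pvSplit_ne_nil _)
    | cons a b => exact ⟨a, b, rfl⟩
  rw [ht, (pvAExe_eq_split s.toList).1, ht]
  simp

-- ===== VERDICT (by name: the statement is the Claim_ definition above) =====
theorem get_cmd_spec : Claim_equal_get_cmd := by
  intro app _
  unfold Spec_get_cmd get_cmd get_cmd_alt
  set d := PySem.Dict.mk app with hd
  cases hE : d.get? "Exec" with
  | none =>
    have : d.contains "Exec" = false := by
      rw [PySem.Dict.contains_eq_isSome_get?, hE]; rfl
    simp [this, hE]
  | some exec =>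
    have hcE : d.contains "Exec" = true := by
      rw [PySem.Dict.contains_eq_isSome_get?, hE]; rfl
    have hgE : d.getD "Exec" "" = exec := PySem.Dict.getD_of_get?_eq_some _ _ hE
    simp only [hcE, if_true, hgE]
    rw [exe_eq]
    -- remaining: the Path prefix and the Terminal wrapper agree
    cases hP : d.get? "Path" with
    | none =>
      have hcP : d.contains "Path" = false := by
        rw [PySem.Dict.contains_eq_isSome_get?, hP]; rfl
      cases hT : d.get? "Terminal" with
      | none =>
        have hcT : d.contains "Terminal" = false := by
          rw [PySem.Dict.contains_eq_isSome_get?, hT]; rfl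
        simp [hcP, hcT, hE]
      | some t =>
        have hcT : d.contains "Terminal" = true := by
          rw [PySem.Dict.contains_eq_isSome_get?, hT]; rfl
        have hgT : d.getD "Terminal" "" = t := PySem.Dict.getD_of_get?_eq_some _ _ hT
        simp [hcP, hcT, hgT, hE]
    | some p =>
      have hcP : d.contains "Path" = true := by
        rw [PySem.Dict.contains_eq_isSome_get?, hP]; rfl
      have hgP : d.getD "Path" "" = p := PySem.Dict.getD_of_get?_eq_some _ _ hP
      cases hT : d.get? "Terminal" with
      | none =>
        have hcT : d.contains "Terminal" = false := by
          rw [PySem.Dict.contains_eq_isSome_get?, hT]; rfl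
        simp [hcP, hcT, hgP, hE]
      | some t =>
        have hcT : d.contains "Terminal" = true := by
          rw [PySem.Dict.contains_eq_isSome_get?, hT]; rfl
        have hgT : d.getD "Terminal" "" = t := PySem.Dict.getD_of_get?_eq_some _ _ hT
        simp [hcP, hcT, hgP, hgT, hE]
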